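-- pv_equiv track=rewrite | github.com/HoduUlmu/ps | 파이썬_알고리즘_인터뷰/Part_18_이진탐색/baekjoon2512_예산/my_code.py | get_max_budget
-- ===== SOURCE A (Python) =====
-- import bisect
--
-- def get_max_budget(budget_request: list, country_budget: int):
--     if sum(budget_request) <= country_budget:
--         return budget_request[-1]
--
--     lo = 1
--     hi = budget_request[-1]
--     max_budget = 0
--
--     while lo <= hi:
--         mid = (lo + hi) // 2
--         new_budget = get_new_budget(budget_request, mid)
--
--         if new_budget == country_budget:
--             return mid
--         elif new_budget < country_budget:
--             max_budget = mid
--             lo = mid + 1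
--         else:
--             hi = mid - 1
--
--     return max_budget
--
-- def get_new_budget(budget: list, limit: int):
--     idx = bisect.bisect_left(budget, limit)
--     return (len(budget) - idx) * limit + sum(budget[:idx])
-- ===== SOURCE B (Python) =====
-- import bisect
--
-- def get_max_budget(budget_request: list, country_budget: int):
--     n = len(budget_request)
--     prefix = [0]
--     for v in budget_request:
--         prefix.append(prefix[-1] + v)
--     if prefix[n] <= country_budget:
--         return budget_request[-1]
--
--     def search(lo, hi, best):
--         if lo > hi:
--             return best
--         mid = (lo + hi) // 2
--         idx = bisect.bisect_left(budget_request, mid)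
--         capped = prefix[idx] + (n - idx) * mid
--         if capped == country_budget:
--             return mid
--         if capped < country_budget:
--             return search(mid + 1, hi, mid)
--         return search(lo, mid - 1, best)
--
--     return search(1, budget_request[-1], 0)
-- ===== Notes on version B (the rewrite author's own statement) =====
-- stated objective: alternative
-- what changed: B builds a prefix-sum table once and evaluates each binary-search probe from it by a table lookup at the bisect index, instead of A's slice-and-sum over the list at every probe; the outer search is a recursive function instead of a while loop.
import Mathlib
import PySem

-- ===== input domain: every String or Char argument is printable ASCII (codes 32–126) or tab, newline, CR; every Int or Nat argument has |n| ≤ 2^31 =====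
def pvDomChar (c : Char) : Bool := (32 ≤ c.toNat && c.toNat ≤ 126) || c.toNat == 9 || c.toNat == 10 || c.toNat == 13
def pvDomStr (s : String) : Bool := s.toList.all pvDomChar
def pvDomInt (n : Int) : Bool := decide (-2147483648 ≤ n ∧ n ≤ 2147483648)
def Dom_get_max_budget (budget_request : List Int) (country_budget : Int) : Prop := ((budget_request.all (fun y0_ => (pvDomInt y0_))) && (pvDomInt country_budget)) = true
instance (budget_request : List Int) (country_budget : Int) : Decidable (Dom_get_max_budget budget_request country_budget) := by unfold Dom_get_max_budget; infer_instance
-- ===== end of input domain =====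

-- ===== PORT A =====
-- B replaces A's per-probe slice-and-sum with a prefix-sum table built once, looked up at the bisect index; objective: alternative.

-- helper of A: get_new_budget(budget, limit) = (len(budget) - bisect_left(budget, limit)) * limit + sum(budget[:idx])
def get_new_budget (budget : List Int) (limit : Int) : Int :=
  let idx := PySem.List.bisectLeft budget limit
  ((budget.length : Int) - (idx : Int)) * limit + (PySem.List.slice budget none (some (idx : Int))).sum

-- A's while-loop over lo, hi, max_budget; fuel = the interval length (hi+1-lo), an exact bound on the
-- iteration count (the interval shrinks by at least 1 each step), so the port computes exactly the Python loop
def loopA (budget : List Int) (cb : Int) (fuel : Nat) (lo hi maxb : Int) : Int :=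
  match fuel with
  | 0 => maxb
  | f + 1 =>
    if lo ≤ hi then
      let mid := PySem.Int.floordiv (lo + hi) 2
      let nb := get_new_budget budget mid
      if nb = cb then mid
      else if nb < cb then loopA budget cb f (mid + 1) hi mid
      else loopA budget cb f lo (mid - 1) maxb
    else maxb

def get_max_budget (budget_request : List Int) (country_budget : Int) : Int :=
  if budget_request.sum ≤ country_budget then
    (PySem.List.pyGet? budget_request (-1)).getD 0   -- budget_request[-1]; Pre_ excludes [], where Python raises IndexError
  else
    loopA budget_request country_budget (((PySem.List.pyGet? budget_request (-1)).getD 0).toNat) 1 ((PySem.List.pyGet? budget_request (-1)).getD 0) 0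

-- ===== PORT B =====
-- prefix = [0]; for v in budget_request: prefix.append(prefix[-1] + v)
def prefixB (xs : List Int) : List Int :=
  xs.foldl (fun p v => p ++ [p.getLastD 0 + v]) [0]

-- B's recursive search(lo, hi, best) with the prefix-sum evaluation of the capped total (same exact fuel)
def searchB (budget prefx : List Int) (n : Nat) (cb : Int) (fuel : Nat) (lo hi best : Int) : Int :=
  match fuel with
  | 0 => best
  | f + 1 =>
    if hi < lo then best
    else
      let mid := PySem.Int.floordiv (lo + hi) 2
      let idx := PySem.List.bisectLeft budget mid
      let capped := prefx.getD idx 0 + ((n : Int) - (idx : Int)) * mid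
      if capped = cb then mid
      else if capped < cb then searchB budget prefx n cb f (mid + 1) hi mid
      else searchB budget prefx n cb f lo (mid - 1) best

def get_max_budget_alt (budget_request : List Int) (country_budget : Int) : Int :=
  let n := budget_request.length
  let prefx := prefixB budget_request
  if prefx.getD n 0 ≤ country_budget then
    (PySem.List.pyGet? budget_request (-1)).getD 0
  else
    searchB budget_request prefx n country_budget (((PySem.List.pyGet? budget_request (-1)).getD 0).toNat) 1 ((PySem.List.pyGet? budget_request (-1)).getD 0) 0

-- ===== PRECONDITION & SPEC =====
-- Pre_ excludes only the empty list, on which Python A raises IndexError at budget_request[-1] (B raises there too).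
def Pre_get_max_budget (budget_request : List Int) (country_budget : Int) : Prop :=
  budget_request ≠ []
instance (budget_request : List Int) (country_budget : Int) : Decidable (Pre_get_max_budget budget_request country_budget) := by
  unfold Pre_get_max_budget; infer_instance

def pvWitness_get_max_budget : List Int × Int := ([1, 3, 5, 7], 10)

def Spec_get_max_budget (budget_request : List Int) (country_budget : Int) (out : Int) : Prop := out = get_max_budget_alt budget_request country_budget
instance (budget_request : List Int) (country_budget : Int) (out : Int) : Decidable (Spec_get_max_budget budget_request country_budget out) := by unfold Spec_get_max_budget; infer_instance

-- ===== CLAIM (what is proved, stated in full; the proofs are below) =====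
def Claim_equal_get_max_budget : Prop := ∀ (budget_request : List Int) (country_budget : Int), Dom_get_max_budget budget_request country_budget → Pre_get_max_budget budget_request country_budget → Spec_get_max_budget budget_request country_budget (get_max_budget budget_request country_budget)

-- ===== LEMMAS AND PROOFS =====

-- the bisect loop never exceeds max lo hi
lemma bisectLeftLoop_le (xs : List Int) (x : Int) :
    ∀ (fuel lo hi : Nat), PySem.List.bisectLeftLoop xs x fuel lo hi ≤ max lo hi := by
  intro fuel
  induction fuel with
  | zero => intro lo hi; simp [PySem.List.bisectLeftLoop]
  | succ f ih =>
    intro lo hi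
    rw [PySem.List.bisectLeftLoop]
    split
    · rename_i hlt
      cases h : xs[(lo + hi) / 2]? with
      | none => dsimp only; omega
      | some y =>
        dsimp only
        split
        · have := ih ((lo + hi) / 2 + 1) hi; omega
        · have := ih lo ((lo + hi) / 2); omega
    · omega

lemma bisectLeft_le_length (xs : List Int) (x : Int) :
    PySem.List.bisectLeft xs x ≤ xs.length := by
  have := bisectLeftLoop_le xs x xs.length 0 xs.length
  simpa [PySem.List.bisectLeft] using this

-- indexing into scanl gives the prefix sum
lemma scanl_getD (xs : List Int) :
    ∀ (s : Int) (i : Nat), i ≤ xs.length →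
      (xs.scanl (· + ·) s).getD i 0 = s + (xs.take i).sum := by
  induction xs with
  | nil =>
    intro s i h
    have : i = 0 := by simpa using h
    subst this; simp [List.scanl]
  | cons x xs ih =>
    intro s i h
    cases i with
    | zero => simp [List.scanl]
    | succ j =>
      have hj : j ≤ xs.length := by simpa using h
      simp only [List.scanl_cons, List.getD_cons_succ, List.take_succ_cons, List.sum_cons]
      rw [ih (s + x) j hj]
      ring

-- Source B's prefix loop builds exactly scanl (+) 0
lemma foldl_prefix (xs : List Int) :
    ∀ (p : List Int) (s : Int), p.getLastD 0 = s →
      xs.foldl (fun p v => p ++ [p.getLastD 0 + v]) p = p ++ (xs.scanl (· + ·) s).tail := by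
  induction xs with
  | nil => intro p s _; simp [List.scanl]
  | cons x xs ih =>
    intro p s hs
    simp only [List.foldl_cons, hs]
    rw [ih (p ++ [s + x]) (s + x) (by simp)]
    cases xs with
    | nil => simp [List.scanl]
    | cons y ys => simp [List.scanl_cons]

lemma prefixB_eq_scanl (xs : List Int) : prefixB xs = xs.scanl (· + ·) 0 := by
  rw [prefixB, foldl_prefix xs [0] 0 (by simp)]
  cases xs with
  | nil => simp [List.scanl]
  | cons y ys => simp [List.scanl_cons]

lemma prefixB_getD (xs : List Int) (i : Nat) (h : i ≤ xs.length) :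
    (prefixB xs).getD i 0 = (xs.take i).sum := by
  rw [prefixB_eq_scanl, scanl_getD xs 0 i h]; ring

-- B's prefix-sum evaluation equals A's get_new_budget
lemma eval_eq (budget : List Int) (mid : Int) :
    (prefixB budget).getD (PySem.List.bisectLeft budget mid) 0
      + ((budget.length : Int) - (PySem.List.bisectLeft budget mid : Int)) * mid
    = get_new_budget budget mid := by
  rw [get_new_budget]
  rw [prefixB_getD budget _ (bisectLeft_le_length budget mid)]
  rw [PySem.List.slice_to_natCast]
  ring

lemma loop_eq (budget : List Int) (cb : Int) :
    ∀ (fuel : Nat) (lo hi best : Int),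
      searchB budget (prefixB budget) budget.length cb fuel lo hi best
        = loopA budget cb fuel lo hi best := by
  intro fuel
  induction fuel with
  | zero => intro lo hi best; rfl
  | succ f ih =>
    intro lo hi best
    rw [searchB, loopA]
    dsimp only
    rw [eval_eq]
    by_cases hle : lo ≤ hi
    · rw [if_neg (by omega : ¬ hi < lo), if_pos hle]
      by_cases h1 : get_new_budget budget (PySem.Int.floordiv (lo + hi) 2) = cb
      · rw [if_pos h1, if_pos h1]
      · rw [if_neg h1, if_neg h1]
        by_cases h2 : get_new_budget budget (PySem.Int.floordiv (lo + hi) 2) < cb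
        · rw [if_pos h2, if_pos h2]; exact ih _ _ _
        · rw [if_neg h2, if_neg h2]; exact ih _ _ _
    · rw [if_pos (by omega : hi < lo), if_neg hle]

-- ===== VERDICT (by name: the statement is the Claim_ definition above) =====
theorem get_max_budget_spec : Claim_equal_get_max_budget := by
  intro budget cb _hdom _hpre
  simp only [Spec_get_max_budget, get_max_budget, get_max_budget_alt]
  rw [prefixB_getD budget budget.length le_rfl, List.take_length]
  split
  · rfl
  · exact (loop_eq budget cb (((PySem.List.pyGet? budget (-1)).getD 0).toNat) 1 ((PySem.List.pyGet? budget (-1)).getD 0) 0).symm
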